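-- pv_equiv track=rewrite | github.com/Ozarkltcrx/cycle-tracker | app.py | cycle_status_label
-- ===== SOURCE A (Python) =====
-- CYCLE_STAGE_ORDER = [
--     "Pulling meds",
--     "Exported",
--     "Traying",
--     "Running in machine",
--     "Through machine",
--     "Through perl",
--     "Bag check completed",
--     "Toted",
--     "Facility finished",
-- ]
--
-- def stage_counts(stage_map: dict[str, str], stage_order: list[str] = None) -> tuple[int, int]:
--     if stage_order is None:
--         stage_order = CYCLE_STAGE_ORDER
--     completed = sum(1 for stage in stage_order if stage_map.get(stage, ""))
--     return completed, len(stage_order)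
--
-- def cycle_status_label(stage_map: dict[str, str], stage_order: list[str] = None) -> str:
--     if stage_order is None:
--         stage_order = CYCLE_STAGE_ORDER
--     completed, total = stage_counts(stage_map, stage_order)
--     if completed == 0:
--         return "Not Started"
--     if completed >= total:
--         return "Completed"
--
--     for stage in reversed(stage_order):
--         if stage_map.get(stage, ""):
--             return stage
--
--     return "Not Started"
-- ===== SOURCE B (Python) =====
-- CYCLE_STAGE_ORDER = [
--     "Pulling meds",
--     "Exported",
--     "Traying",
--     "Running in machine",
--     "Through machine",
--     "Through perl",
--     "Bag check completed",
--     "Toted",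
--     "Facility finished",
-- ]
--
-- def cycle_status_label(stage_map, stage_order=None):
--     if stage_order is None:
--         stage_order = CYCLE_STAGE_ORDER
--     completed = 0
--     last = "Not Started"
--     for stage in stage_order:
--         if stage_map.get(stage, ""):
--             completed += 1
--             last = stage
--     if completed == 0:
--         return "Not Started"
--     if completed >= len(stage_order):
--         return "Completed"
--     return last
-- ===== Notes on version B (the rewrite author's own statement) =====
-- stated objective: simpler
-- what changed: Replaced the separate stage_counts pass plus a second reversed scan for the last completed stage by one fused forward loop that maintains both the completed counter and the last completed stage.
import Mathlib
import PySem

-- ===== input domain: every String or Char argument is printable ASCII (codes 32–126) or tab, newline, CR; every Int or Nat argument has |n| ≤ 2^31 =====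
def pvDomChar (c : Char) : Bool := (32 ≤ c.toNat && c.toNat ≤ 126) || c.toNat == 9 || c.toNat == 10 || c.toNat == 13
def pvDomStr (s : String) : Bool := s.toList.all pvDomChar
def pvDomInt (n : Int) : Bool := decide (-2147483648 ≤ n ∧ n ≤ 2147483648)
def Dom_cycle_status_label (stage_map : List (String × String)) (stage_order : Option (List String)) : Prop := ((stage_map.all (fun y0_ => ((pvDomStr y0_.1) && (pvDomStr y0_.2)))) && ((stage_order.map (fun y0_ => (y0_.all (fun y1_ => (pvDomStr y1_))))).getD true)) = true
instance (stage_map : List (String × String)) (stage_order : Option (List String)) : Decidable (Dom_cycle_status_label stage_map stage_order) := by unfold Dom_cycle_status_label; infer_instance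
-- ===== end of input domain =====

-- ===== PORT A =====
-- One honest line: B fuses A's counting pass (stage_counts) and A's reversed scan for the
-- last completed stage into a single forward loop; objective: simpler (same O(n) cost).
def CYCLE_STAGE_ORDER : List String :=
  ["Pulling meds", "Exported", "Traying", "Running in machine", "Through machine",
   "Through perl", "Bag check completed", "Toted", "Facility finished"]

def stage_counts (stage_map : List (String × String)) (stage_order : Option (List String)) : Nat × Nat :=
  let order := stage_order.getD CYCLE_STAGE_ORDER
  (order.foldl (fun c s => if (PySem.Dict.mk stage_map).getD s "" != "" then c + 1 else c) 0,
   order.length)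

def cycle_status_label (stage_map : List (String × String)) (stage_order : Option (List String)) : String :=
  let order := stage_order.getD CYCLE_STAGE_ORDER
  let ct := stage_counts stage_map (some order)
  if ct.1 = 0 then "Not Started"
  else if ct.1 ≥ ct.2 then "Completed"
  else
    -- for stage in reversed(stage_order): if stage_map.get(stage, ""): return stage
    match order.reverse.find? (fun s => (PySem.Dict.mk stage_map).getD s "" != "") with
    | some s => s
    | none => "Not Started"

-- ===== PORT B =====
def cycle_status_label_alt (stage_map : List (String × String)) (stage_order : Option (List String)) : String :=
  let order := stage_order.getD CYCLE_STAGE_ORDER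
  let r := order.foldl
    (fun (acc : Nat × String) s =>
      if (PySem.Dict.mk stage_map).getD s "" != "" then (acc.1 + 1, s) else acc)
    (0, "Not Started")
  if r.1 = 0 then "Not Started"
  else if r.1 ≥ order.length then "Completed"
  else r.2

-- ===== PRECONDITION & SPEC =====
def Spec_cycle_status_label (stage_map : List (String × String)) (stage_order : Option (List String)) (out : String) : Prop := out = cycle_status_label_alt stage_map stage_order
instance (stage_map : List (String × String)) (stage_order : Option (List String)) (out : String) : Decidable (Spec_cycle_status_label stage_map stage_order out) := by unfold Spec_cycle_status_label; infer_instance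

-- ===== CLAIM =====
def Claim_equal_cycle_status_label : Prop := ∀ (stage_map : List (String × String)) (stage_order : Option (List String)), Dom_cycle_status_label stage_map stage_order → Spec_cycle_status_label stage_map stage_order (cycle_status_label stage_map stage_order)

-- ===== LEMMAS AND PROOFS =====
-- A's counting loop is a countP.
theorem foldl_count_eq (p : String → Bool) :
    ∀ (l : List String) (n : Nat),
      l.foldl (fun c s => if p s then c + 1 else c) n = n + l.countP p := by
  intro l
  induction l with
  | nil => intro n; simp
  | cons x l ih =>
    intro n
    by_cases h : p x = true
    · simp [List.foldl, h, ih]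
      omega
    · simp [List.foldl, h, ih]

-- B's fused loop computes the count and the LAST stage satisfying p (= first of the reverse).
theorem foldl_pair_eq (p : String → Bool) :
    ∀ (l : List String) (c : Nat) (last : String),
      l.foldl (fun (acc : Nat × String) s => if p s then (acc.1 + 1, s) else acc) (c, last)
        = (c + l.countP p, (l.reverse.find? p).getD last) := by
  intro l
  induction l with
  | nil => intro c last; simp
  | cons x l ih =>
    intro c last
    by_cases h : p x = true
    · simp only [List.foldl, h, ih, List.reverse_cons, List.find?_append, List.countP_cons]
      cases hf : l.reverse.find? p <;> simp [h] <;> omega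
    · have h' : p x = false := by simpa using h
      simp [List.foldl, h', ih, List.find?_append]

-- ===== VERDICT =====
theorem cycle_status_label_spec : Claim_equal_cycle_status_label := by
  intro sm so _
  unfold Spec_cycle_status_label cycle_status_label cycle_status_label_alt stage_counts
  simp only [foldl_count_eq, foldl_pair_eq, Nat.zero_add]
  cases hf : ((so.getD CYCLE_STAGE_ORDER).reverse.find? (fun s => (PySem.Dict.mk sm).getD s "" != "")) <;>
    simp
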